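-- pv_equiv track=rewrite | github.com/pypi-data/pypi-mirror-333 | packages/pneuma/pneuma-0.0.4.tar.gz/pneuma-0.0.4/src/pneuma/summarizer/summarizer.py | __get_special_indices
-- ===== SOURCE A (Python) =====
-- def __get_special_indices(prompts: list[str], batch_size: int) -> list[int]:
--     """
--     Sorts `prompts` in a specific manner to try to balance the memory load
--     for each batch of LLM inferences.
--
--     ## Args
--     - **prompts** (`list[str]`): The list of prompts to narrate columns of
--     tables.
--     - **batch_size** (`int`): The optimal batch size value to be used.
--
--     ## Returns
--     - `list[int]`: The "special indices" for the `prompts` given the `batch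
--     size`.
--     """
--     # Step 1: Sort the conversations (indices) in decreasing order
--     sorted_indices = sorted(
--         range(len(prompts)), key=lambda x: len(prompts[x]), reverse=True
--     )
--
--     # Step 2: Interleave the indices (longest, shortest, second longest, second shortest, ...)
--     final_indices: list[int] = []
--     i, j = 0, len(sorted_indices) - 1
--
--     while i <= j:
--         if i == j:
--             final_indices.append(sorted_indices[i])
--             break
--
--         final_indices.append(sorted_indices[i])
--         i += 1
--
--         for _ in range(batch_size - 1):
--             if i <= j:
--                 final_indices.append(sorted_indices[j])
--                 j -= 1
--             else:
--                 break
--     return final_indices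
-- ===== SOURCE B (Python) =====
-- def __get_special_indices(prompts: list[str], batch_size: int) -> list[int]:
--     n = len(prompts)
--     order = sorted(range(n), key=lambda x: len(prompts[x]), reverse=True)
--     # number of "front" (long-side) picks: one per round of batch_size
--     f = n if batch_size < 1 else -(-n // batch_size)
--     fronts = order[:f]
--     tails = order[f:][::-1]
--     c = batch_size - 1
--     return [idx for k in range(f) for idx in [fronts[k]] + tails[k * c:(k + 1) * c]]
-- ===== Notes on version B (the rewrite author's own statement) =====
-- stated objective: alternative
-- what changed: Instead of interleaving with two crossing pointers in one stateful while-loop, B computes the front/tail split point in closed form (f = ceil(n/batch_size), all of n when batch_size < 1), splits the length-sorted index list into fronts and reversed tails, and emits each batch as fronts[k] followed by a slice of the tails.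
import Mathlib
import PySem

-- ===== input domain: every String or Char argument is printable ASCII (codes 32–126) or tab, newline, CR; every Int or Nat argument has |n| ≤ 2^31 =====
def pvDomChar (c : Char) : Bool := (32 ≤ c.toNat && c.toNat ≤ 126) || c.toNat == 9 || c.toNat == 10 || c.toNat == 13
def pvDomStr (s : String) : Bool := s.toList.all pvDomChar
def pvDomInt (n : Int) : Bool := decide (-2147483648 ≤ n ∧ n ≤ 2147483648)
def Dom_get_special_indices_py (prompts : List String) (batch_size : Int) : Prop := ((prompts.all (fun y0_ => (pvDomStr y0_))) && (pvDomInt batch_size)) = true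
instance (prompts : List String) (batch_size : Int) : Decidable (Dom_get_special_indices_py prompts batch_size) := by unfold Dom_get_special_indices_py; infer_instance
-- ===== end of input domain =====

-- B replaces A's crossing-pointer interleaving loop by a closed-form ceil split of the sorted
-- indices into fronts/tails plus slice concatenation (different decomposition, same cost).

-- ===== PORT A =====
-- inner `for _ in range(batch_size - 1)` loop: append sorted_indices[j]; j -= 1 while i <= j, else break.
-- The index j is always in range when it is read (0 ≤ i ≤ j < len), so the total pyGetD is exact here.
def pvInnerA (S : List Int) (i : Int) : Nat → Int → List Int → List Int × Int
  | 0, j, acc => (acc, j)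
  | cnt+1, j, acc =>
    if i ≤ j then pvInnerA S i cnt (j - 1) (acc ++ [PySem.List.pyGetD S j 0])
    else (acc, j)

-- A's outer `while i <= j` loop, transcribed with a fuel argument (each pass increases i,
-- so `S.length` passes always suffice; when fuel is 0 the loop condition i <= j is already false)
def pvOuterA (S : List Int) (batch_size : Int) : Nat → Int → Int → List Int → List Int
  | 0, _, _, acc => acc
  | fuel + 1, i, j, acc =>
    if i ≤ j then
      if i = j then acc ++ [PySem.List.pyGetD S i 0]
      else
        let p := pvInnerA S (i + 1) (batch_size - 1).toNat j (acc ++ [PySem.List.pyGetD S i 0])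
        pvOuterA S batch_size fuel (i + 1) p.2 p.1
    else acc

def get_special_indices_py (prompts : List String) (batch_size : Int) : List Int :=
  -- sorted(range(len(prompts)), key=lambda x: len(prompts[x]), reverse=True); x is always in range
  let sorted_indices := PySem.List.sorted (PySem.List.pyRange 0 (PySem.List.len prompts) 1)
      (fun x => PySem.Str.len (PySem.List.pyGetD prompts x "")) true
  pvOuterA sorted_indices batch_size sorted_indices.length 0 (PySem.List.len sorted_indices - 1) []

-- ===== PORT B =====
def get_special_indices_py_alt (prompts : List String) (batch_size : Int) : List Int :=
  let n : Int := PySem.List.len prompts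
  let order := PySem.List.sorted (PySem.List.pyRange 0 n 1)
      (fun x => PySem.Str.len (PySem.List.pyGetD prompts x "")) true
  -- f = n if batch_size < 1 else -(-n // batch_size)
  let f : Int := if batch_size < 1 then n else -(PySem.Int.floordiv (-n) batch_size)
  let fronts := PySem.List.slice order none (some f)            -- order[:f]
  let tails := (PySem.List.slice order (some f) none).reverse   -- order[f:][::-1] ([::-1] is reverse)
  let c := batch_size - 1
  -- [idx for k in range(f) for idx in [fronts[k]] + tails[k*c:(k+1)*c]]; fronts[k] always in range
  (PySem.List.pyRange 0 f 1).flatMap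
    (fun k => PySem.List.pyGetD fronts k 0 :: PySem.List.slice tails (some (k * c)) (some ((k + 1) * c)))

-- ===== PRECONDITION & SPEC =====
def Spec_get_special_indices_py (prompts : List String) (batch_size : Int) (out : List Int) : Prop := out = get_special_indices_py_alt prompts batch_size
instance (prompts : List String) (batch_size : Int) (out : List Int) : Decidable (Spec_get_special_indices_py prompts batch_size out) := by unfold Spec_get_special_indices_py; infer_instance

-- ===== CLAIM (what is proved, stated in full; the proofs are below) =====
def Claim_equal_get_special_indices_py : Prop := ∀ (prompts : List String) (batch_size : Int), Dom_get_special_indices_py prompts batch_size → Spec_get_special_indices_py prompts batch_size (get_special_indices_py prompts batch_size)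

-- ===== LEMMAS AND PROOFS =====

-- reference interleaving of one segment: head, then up to c elements from the back, then recurse
def pvGo (c : Nat) : List Int → List Int
  | [] => []
  | [x] => [x]
  | x :: y :: rest =>
    x :: (((y :: rest).reverse.take c) ++ pvGo c (((y :: rest).reverse.drop c).reverse))
termination_by l => l.length
decreasing_by simp

theorem pvGo_nil (c : Nat) : pvGo c [] = [] := by rw [pvGo]

theorem pvGo_singleton (c : Nat) (x : Int) : pvGo c [x] = [x] := by rw [pvGo]

theorem pvGo_cons_cons (c : Nat) (x y : Int) (rest : List Int) :
    pvGo c (x :: y :: rest)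
      = x :: (((y :: rest).reverse.take c) ++ pvGo c (((y :: rest).reverse.drop c).reverse)) := by
  rw [pvGo]

theorem pvGo_zero : ∀ (N : Nat) (S : List Int), S.length ≤ N → pvGo 0 S = S := by
  intro N
  induction N with
  | zero =>
    intro S h
    have hS : S = [] := by cases S <;> simp_all
    rw [hS, pvGo_nil]
  | succ N ih =>
    intro S h
    match S with
    | [] => exact pvGo_nil 0
    | [x] => exact pvGo_singleton 0 x
    | x :: y :: rest =>
      rw [pvGo_cons_cons]
      simp only [List.take_zero, List.drop_zero, List.reverse_reverse, List.nil_append]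
      rw [ih (y :: rest) (by simp at h ⊢; omega)]

theorem pvInnerA_eq (S : List Int) (i : Int) (hi : 0 ≤ i) :
    ∀ (cnt : Nat) (j : Int) (acc : List Int), j < S.length →
      pvInnerA S i cnt j acc =
        (acc ++ ((S.drop i.toNat).take (j + 1 - i).toNat).reverse.take cnt,
         j - (min cnt (j + 1 - i).toNat : Nat)) := by
  intro cnt
  induction cnt with
  | zero => intro j acc hj; simp [pvInnerA]
  | succ n ih =>
    intro j acc hj
    simp only [pvInnerA]
    split
    case isTrue h =>
      rw [ih (j - 1) (acc ++ [PySem.List.pyGetD S j 0]) (by omega)]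
      have hjN : j.toNat < S.length := by omega
      have hget : PySem.List.pyGetD S j 0 = S[j.toNat] :=
        PySem.List.pyGetD_eq_getElem S 0 (by omega) (by omega)
      have hseg : (S.drop i.toNat).take (j + 1 - i).toNat
          = (S.drop i.toNat).take (j - 1 + 1 - i).toNat ++ [S[j.toNat]] := by
        have hm : (j + 1 - i).toNat = (j - i).toNat + 1 := by omega
        have hm2 : (j - 1 + 1 - i).toNat = (j - i).toNat := by omega
        rw [hm, hm2, List.take_add_one]
        have hidx : (S.drop i.toNat)[(j - i).toNat]? = some S[j.toNat] := by
          rw [List.getElem?_drop]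
          have hij : i.toNat + (j - i).toNat = j.toNat := by omega
          rw [hij, List.getElem?_eq_getElem hjN]
        rw [hidx]
        rfl
      rw [Prod.mk.injEq]
      constructor
      · rw [hget, hseg, List.reverse_append]
        simp [List.append_assoc]
      · omega
    case isFalse h =>
      have h0 : (j + 1 - i).toNat = 0 := by omega
      simp [h0]

theorem pvOuterA_eq_go (S : List Int) (bs : Int) :
    ∀ (N : Nat) (i j : Int) (acc : List Int), (j + 1 - i).toNat ≤ N → 0 ≤ i → j < S.length →
      pvOuterA S bs N i j acc
        = acc ++ pvGo (bs - 1).toNat ((S.drop i.toNat).take (j + 1 - i).toNat) := by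
  intro N
  induction N with
  | zero =>
    intro i j acc hN hi hj
    have h0 : (j + 1 - i).toNat = 0 := by omega
    simp [pvOuterA, h0, pvGo_nil]
  | succ N ih =>
    intro i j acc hN hi hj
    rw [pvOuterA]
    by_cases hij : i ≤ j
    · rw [if_pos hij]
      by_cases he : i = j
      · rw [if_pos he]
        subst he
        have hiN : i.toNat < S.length := by omega
        have h1 : (i + 1 - i).toNat = 1 := by omega
        have hseg : (S.drop i.toNat).take 1 = [S[i.toNat]] := by
          rw [List.drop_eq_getElem_cons hiN]; rfl
        rw [h1, hseg, pvGo_singleton,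
          PySem.List.pyGetD_eq_getElem S 0 hi (by omega)]
      · rw [if_neg he]
        simp only [pvInnerA_eq S (i + 1) (by omega : (0:Int) ≤ i + 1) ((bs - 1).toNat) j
          (acc ++ [PySem.List.pyGetD S i 0]) hj]
        have hjm : (j + 1 - (i + 1)).toNat = (j - i).toNat := by omega
        rw [hjm]
        set c := (bs - 1).toNat with hc
        set m := (j - i).toNat with hm
        have hminm : (min c m : Nat) ≤ m := Nat.min_le_right c m
        rw [ih (i + 1) (j - (min c m : Nat)) _ (by omega) (by omega) (by omega)]
        have hiN : i.toNat < S.length := by omega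
        have hdrop : S.drop i.toNat = S[i.toNat] :: S.drop (i + 1).toNat := by
          have hii : (i + 1).toNat = i.toNat + 1 := by omega
          rw [hii, List.drop_eq_getElem_cons hiN]
        have hT : (S.drop i.toNat).take (j + 1 - i).toNat
            = S[i.toNat] :: (S.drop (i + 1).toNat).take m := by
          rw [hdrop]
          have : (j + 1 - i).toNat = m + 1 := by omega
          rw [this, List.take_succ_cons]
        set T1 := (S.drop (i + 1).toNat).take m with hT1
        have hlenT1 : T1.length = m := by
          rw [hT1]; simp; omega
        have hT2 : (S.drop (i + 1).toNat).take ((j - (min c m : Nat)) + 1 - (i + 1)).toNat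
            = (T1.reverse.drop c).reverse := by
          have hrd : (T1.reverse.drop c).reverse = T1.take (T1.length - c) := by
            rw [List.reverse_drop, List.reverse_reverse, List.length_reverse]
          rw [hrd, hlenT1, hT1, List.take_take]
          congr 1
          omega
        rw [hT2, hT]
        obtain ⟨y, rest, hyr⟩ : ∃ y rest, T1 = y :: rest := by
          cases hT1' : T1 with
          | nil => rw [hT1'] at hlenT1; simp at hlenT1; omega
          | cons y rest => exact ⟨y, rest, rfl⟩
        rw [hyr, pvGo_cons_cons,
          PySem.List.pyGetD_eq_getElem S 0 hi (by omega)]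
        simp [List.append_assoc]
    · rw [if_neg hij]
      have h0 : (j + 1 - i).toNat = 0 := by omega
      simp [h0, pvGo_nil]

theorem pvFlatMap_congr (l : List Nat) (f g : Nat → List Int) (h : ∀ x ∈ l, f x = g x) :
    l.flatMap f = l.flatMap g := by
  induction l with
  | nil => rfl
  | cons a t ih =>
    simp only [List.flatMap_cons]
    rw [h a (by simp), ih (fun x hx => h x (by simp [hx]))]

theorem pvFlatMap_single (l : List Int) (g : Int → Int) :
    l.flatMap (fun k => [g k]) = l.map g := by
  induction l with
  | nil => rfl
  | cons a t ih => simp [List.flatMap_cons, ih]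

theorem pvSlice_nil (a b : Option Int) : PySem.List.slice ([] : List Int) a b = [] := by
  cases a <;> cases b <;> simp [PySem.List.slice]

theorem pvGetD_take : ∀ (l : List Int) (a b : Nat), b < a → (l.take a).getD b 0 = l.getD b 0 := by
  intro l
  induction l with
  | nil => intro a b _; simp
  | cons x t ih =>
    intro a b h
    match a, b with
    | a' + 1, 0 => rfl
    | a' + 1, b' + 1 =>
      rw [List.take_succ_cons, List.getD_cons_succ, List.getD_cons_succ]
      exact ih a' b' (by omega)

theorem pvGetD_drop : ∀ (l : List Int) (a b : Nat), (l.drop a).getD b 0 = l.getD (a + b) 0 := by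
  intro l
  induction l with
  | nil => intro a b; simp
  | cons x t ih =>
    intro a b
    match a with
    | 0 => simp
    | a' + 1 =>
      rw [List.drop_succ_cons, ih a' b]
      have : a' + 1 + b = (a' + b) + 1 := by omega
      rw [this, List.getD_cons_succ]

theorem pvBlocks_eq_go (c : Nat) :
    ∀ (fN : Nat) (S : List Int),
      S.length ≤ fN * (c + 1) → fN * (c + 1) ≤ S.length + c →
      (List.range fN).flatMap
        (fun k => (S.take fN).getD k 0 :: ((S.drop fN).reverse.drop (k * c)).take c)
        = pvGo c S := by
  intro fN
  induction fN with
  | zero =>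
    intro S h1 h2
    have hS : S = [] := by cases S <;> simp_all
    rw [hS, pvGo_nil]
    rfl
  | succ m ih =>
    intro S h1 h2
    have e1 : (m + 1) * (c + 1) = m * c + m + c + 1 := by ring
    have e2 : m * (c + 1) = m * c + m := by ring
    rw [e1] at h1 h2
    have hn1 : 1 ≤ S.length := by
      have := Nat.zero_le (m * c)
      omega
    obtain ⟨x, T1, hxT⟩ : ∃ x T1, S = x :: T1 := by
      cases S with
      | nil => simp at hn1
      | cons a t => exact ⟨a, t, rfl⟩
    have hlenT1 : T1.length + 1 = S.length := by rw [hxT]; rfl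
    by_cases hsmall : S.length ≤ c + 1
    · -- single (= last) round: m = 0, the whole tail is one short slice
      have hm0 : m = 0 := by
        rcases Nat.eq_zero_or_pos m with h | h
        · exact h
        · have : c ≤ m * c := Nat.le_mul_of_pos_left c h
          omega
      subst hm0
      simp only [zero_add, List.range_one, List.flatMap_cons, List.flatMap_nil, List.append_nil,
        Nat.zero_mul, List.drop_zero]
      rw [hxT]
      simp only [List.take_succ_cons, List.take_zero, List.getD_cons_zero,
        List.drop_succ_cons, List.drop_zero]
      have hT1c : T1.reverse.take c = T1.reverse := by
        apply List.take_of_length_le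
        rw [List.length_reverse]
        omega
      rw [hT1c]
      cases hT1n : T1 with
      | nil => rw [pvGo_singleton]; rfl
      | cons y rest =>
        rw [pvGo_cons_cons]
        have hdropnil : (y :: rest).reverse.drop c = [] := by
          apply List.drop_eq_nil_of_le
          rw [List.length_reverse]
          rw [hT1n] at hlenT1
          simp only [List.length_cons] at hlenT1 ⊢
          omega
        rw [hdropnil]
        simp [pvGo_nil]
        rw [hT1n] at hlenT1
        simp only [List.length_cons] at hlenT1
        omega
    · -- full round: m ≥ 1
      have hm1 : 1 ≤ m := by
        rcases Nat.eq_zero_or_pos m with h | h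
        · exfalso
          rw [h] at h1
          simp only [Nat.zero_mul, Nat.zero_add] at h1
          omega
        · exact h
      have hcm : c ≤ m * c := Nat.le_mul_of_pos_left c hm1
      have hmn : m + c + 1 ≤ S.length := by omega
      set M := (S.drop 1).take (S.length - 1 - c) with hM
      have hMlen : M.length = S.length - 1 - c := by
        rw [hM]
        rw [List.length_take, List.length_drop]
        omega
      have hIH := ih M (by rw [hMlen, e2]; omega) (by rw [hMlen, e2]; omega)
      rw [List.range_succ_eq_map, List.flatMap_cons, List.flatMap_map]
      -- the head block of S
      have hfront0 : (S.take (m + 1)).getD 0 0 = x := by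
        rw [hxT, List.take_succ_cons, List.getD_cons_zero]
      have htail0 : ((S.drop (m + 1)).reverse.drop (0 * c)).take c = T1.reverse.take c := by
        rw [Nat.zero_mul, List.drop_zero]
        have h1' : (S.drop (m + 1)).reverse = S.reverse.take (S.length - (m + 1)) :=
          List.reverse_drop
        have h2' : T1.reverse = S.reverse.take (S.length - 1) := by
          have hT1d : T1 = S.drop 1 := by rw [hxT]; rfl
          rw [hT1d, List.reverse_drop]
        rw [h1', h2', List.take_take, List.take_take]
        congr 1
        omega
      -- each later block of S is the corresponding block of M
      have hblocks : (List.range m).flatMap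
            (fun k => (S.take (m + 1)).getD (k + 1) 0
              :: ((S.drop (m + 1)).reverse.drop ((k + 1) * c)).take c)
          = (List.range m).flatMap
            (fun k => (M.take m).getD k 0 :: ((M.drop m).reverse.drop (k * c)).take c) := by
        apply pvFlatMap_congr
        intro k hk
        rw [List.mem_range] at hk
        have hfront : (S.take (m + 1)).getD (k + 1) 0 = (M.take m).getD k 0 := by
          rw [pvGetD_take S (m + 1) (k + 1) (by omega), pvGetD_take M m k (by omega)]
          rw [hM, pvGetD_take _ _ _ (by omega), pvGetD_drop]
          have : k + 1 = 1 + k := by omega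
          rw [this]
        have hMd : M.drop m = (S.drop (m + 1)).take (S.length - 1 - c - m) := by
          rw [hM, List.drop_take, List.drop_drop]
          have : 1 + m = m + 1 := by omega
          rw [this]
        have htails : (M.drop m).reverse = (S.drop (m + 1)).reverse.drop c := by
          rw [hMd, List.reverse_take]
          congr 1
          rw [List.length_drop]
          omega
        rw [hfront, htails, List.drop_drop]
        have : c + k * c = (k + 1) * c := by ring
        rw [this]
      rw [hblocks, hIH, hfront0, htail0]
      -- assemble with pvGo on S = x :: T1 (T1 is nonempty here)
      obtain ⟨y, rest, hyr⟩ : ∃ y rest, T1 = y :: rest := by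
        cases T1 with
        | nil =>
          exfalso
          simp only [List.length_nil] at hlenT1
          omega
        | cons y rest => exact ⟨y, rest, rfl⟩
      have hMgo : M = ((y :: rest).reverse.drop c).reverse := by
        have hrd : ((y :: rest).reverse.drop c).reverse
            = (y :: rest).take ((y :: rest).length - c) := by
          rw [List.reverse_drop, List.reverse_reverse, List.length_reverse]
        have hd1 : S.drop 1 = y :: rest := by rw [hxT, hyr]; rfl
        have hSlen : S.length = rest.length + 2 := by
          rw [hxT, hyr]
          simp only [List.length_cons]
        rw [hrd, hM, hd1, hSlen]
        congr 1
      conv_rhs => rw [hxT, hyr]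
      rw [pvGo_cons_cons, ← hMgo, hyr]
      simp

theorem main_eq (S : List Int) (bs : Int) (n : Int) (hn : n = (S.length : Int)) :
    pvOuterA S bs S.length 0 ((S.length : Int) - 1) []
      = (PySem.List.pyRange 0 (if bs < 1 then n else -(PySem.Int.floordiv (-n) bs)) 1).flatMap
          (fun k =>
            PySem.List.pyGetD (PySem.List.slice S none
              (some (if bs < 1 then n else -(PySem.Int.floordiv (-n) bs)))) k 0 ::
            PySem.List.slice ((PySem.List.slice S
                (some (if bs < 1 then n else -(PySem.Int.floordiv (-n) bs))) none).reverse)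
              (some (k * (bs - 1))) (some ((k + 1) * (bs - 1)))) := by
  subst hn
  have hA : pvOuterA S bs S.length 0 ((S.length : Int) - 1) [] = pvGo (bs - 1).toNat S := by
    rw [pvOuterA_eq_go S bs S.length 0 ((S.length : Int) - 1) [] (by omega) (le_refl 0) (by omega)]
    have hseg : (S.drop (0 : Int).toNat).take (((S.length : Int) - 1) + 1 - 0).toNat = S := by
      simp
    rw [hseg, List.nil_append]
  by_cases hbs : bs < 1
  · simp only [if_pos hbs]
    have hcz : (bs - 1).toNat = 0 := by omega
    rw [hA, hcz, pvGo_zero S.length S (le_refl _)]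
    have hfr : PySem.List.slice S none (some ((S.length : Int))) = S := by
      rw [PySem.List.slice_to S (by omega)]
      simp
    have htl : PySem.List.slice S (some ((S.length : Int))) none = [] := by
      rw [PySem.List.slice_from S (by omega)]
      simp
    rw [hfr, htl]
    simp only [List.reverse_nil, pvSlice_nil]
    rw [pvFlatMap_single]
    have := PySem.List.map_pyGetD_pyRange_zero S 0
    rw [PySem.List.len_eq] at this
    exact this.symm
  · simp only [if_neg hbs]
    have hpos : 0 < bs := by omega
    set f : Int := -(PySem.Int.floordiv (-(S.length : Int)) bs) with hf
    have hbounds : (f - 1) * bs < (S.length : Int) ∧ (S.length : Int) ≤ f * bs :=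
      (PySem.Int.neg_floordiv_neg_eq_iff_of_pos hpos).mp rfl
    have hf0 : 0 ≤ f := by
      by_contra hneg
      have hfb : f * bs ≤ (-1) * bs := by
        apply mul_le_mul_of_nonneg_right (by omega) (by omega)
      have : (0 : Int) ≤ (S.length : Int) := by positivity
      omega
    set fN := f.toNat with hfN
    set cN := (bs - 1).toNat with hcN
    have hcast : ((fN * (cN + 1) : Nat) : Int) = f * bs := by
      push_cast
      rw [Int.toNat_of_nonneg hf0]
      have : ((bs - 1).toNat : Int) = bs - 1 := Int.toNat_of_nonneg (by omega)
      rw [this]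
      ring
    have hfb1 : (f - 1) * bs = f * bs - bs := by ring
    have h1 : S.length ≤ fN * (cN + 1) := by omega
    have h2 : fN * (cN + 1) ≤ S.length + cN := by
      have hcNc : ((cN : Nat) : Int) = bs - 1 := Int.toNat_of_nonneg (by omega)
      omega
    have hfr : PySem.List.slice S none (some f) = S.take fN :=
      PySem.List.slice_to S hf0
    have htl : PySem.List.slice S (some f) none = S.drop fN :=
      PySem.List.slice_from S hf0
    rw [hA, hfr, htl]
    rw [PySem.List.pyRange_one 0 f]
    have hsub : (f - 0).toNat = fN := by omega
    rw [hsub, List.flatMap_map]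
    have hstep : ∀ k ∈ List.range fN,
        (fun a : Nat =>
          PySem.List.pyGetD (S.take fN) (0 + (a : Int)) 0 ::
          PySem.List.slice ((S.drop fN).reverse)
            (some ((0 + (a : Int)) * (bs - 1))) (some ((0 + (a : Int) + 1) * (bs - 1)))) k
        = (fun k : Nat => (S.take fN).getD k 0
            :: (((S.drop fN).reverse.drop (k * cN)).take cN)) k := by
      intro k _
      simp only [zero_add]
      rw [PySem.List.pyGetD_natCast]
      have hc1 : bs - 1 = (cN : Int) := (Int.toNat_of_nonneg (by omega)).symm
      rw [hc1]
      have e1 : (k : Int) * (cN : Int) = ((k * cN : Nat) : Int) := by push_cast; ring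
      have e2 : ((k : Int) + 1) * (cN : Int) = (((k + 1) * cN : Nat) : Int) := by push_cast; ring
      rw [e1, e2, PySem.List.slice_natCast]
      have : (k + 1) * cN - k * cN = cN := by
        have : (k + 1) * cN = k * cN + cN := by ring
        omega
      rw [this]
    rw [pvFlatMap_congr _ _ _ hstep]
    exact (pvBlocks_eq_go cN fN S h1 h2).symm

-- ===== VERDICT (by name: the statement is the Claim_ definition above) =====
theorem get_special_indices_py_spec : Claim_equal_get_special_indices_py := by
  intro prompts batch_size _dom
  unfold Spec_get_special_indices_py
  simp only [get_special_indices_py, get_special_indices_py_alt]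
  refine main_eq _ batch_size _ ?_
  rw [(PySem.List.sorted_perm (PySem.List.pyRange 0 (PySem.List.len prompts) 1)
    (fun x => PySem.Str.len (PySem.List.pyGetD prompts x "")) true).length_eq]
  simp [PySem.List.len_eq, PySem.List.length_pyRange_one]
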